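-- pv_equiv track=rewrite | github.com/jacobthewest/cs180 | PythonLabs/Lab3/main.py | cube
-- ===== SOURCE A (Python) =====
-- def cube(n):
--     totalToReturn = 0
--     for i in range(1, n+1):
--         result = pow(i,3) # i^3 is how pow works
--         resultAsString = str(result)
--
--         firstChar = resultAsString[0]
--         firstCharAsInt = int(firstChar)
--
--         if firstCharAsInt % 2 == 0: # if the first thing is even
--             totalToReturn += result
--     return totalToReturn
-- ===== SOURCE B (Python) =====
-- def _lead(x):
--     while x >= 10:
--         x //= 10
--     return x
--
-- def cube(n):
--     cubes = (i * i * i for i in range(1, n + 1))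
--     return sum(c for c in cubes if _lead(c) % 2 == 0)
-- ===== Notes on version B (the rewrite author's own statement) =====
-- stated objective: alternative
-- what changed: B finds the leading digit arithmetically by repeated floor division instead of A's str()/indexing/int() round-trip, and builds the result as a sum over a filtered stream of cubes instead of A's explicit accumulator loop with a branch.
import Mathlib
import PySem

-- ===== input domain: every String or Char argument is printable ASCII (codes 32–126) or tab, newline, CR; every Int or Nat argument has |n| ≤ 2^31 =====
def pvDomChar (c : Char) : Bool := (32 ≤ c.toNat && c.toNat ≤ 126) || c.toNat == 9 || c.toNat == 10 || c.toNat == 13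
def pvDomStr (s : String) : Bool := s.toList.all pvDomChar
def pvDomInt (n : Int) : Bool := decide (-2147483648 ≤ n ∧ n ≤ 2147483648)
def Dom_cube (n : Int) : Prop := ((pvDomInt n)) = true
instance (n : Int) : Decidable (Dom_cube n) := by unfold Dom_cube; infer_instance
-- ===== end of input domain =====

-- B replaces A's str()/index/int() leading-digit detection by repeated floor division and the
-- accumulator loop by a sum over a filtered stream of cubes; no speed claim ("alternative").

-- ===== PORT A =====
-- str(result)[0] never raises (str of an int is nonempty) and int() of that digit never raises,
-- so the .getD defaults below are never reached; A is total.
def cube (n : Int) : Int :=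
  (PySem.List.pyRange 1 (n + 1) 1).foldl (fun totalToReturn i =>
    let result := i * i * i          -- pow(i, 3)
    let resultAsString := PySem.Int.toStr result
    let firstChar := (PySem.Str.pyGet? resultAsString 0).getD '0'
    let firstCharAsInt := (PySem.Int.ofChars? [firstChar]).getD 0
    if PySem.Int.mod firstCharAsInt 2 == 0 then totalToReturn + result else totalToReturn) 0

-- ===== PORT B =====
def leadInt (x : Int) : Int :=
  if 10 ≤ x then leadInt (PySem.Int.floordiv x 10) else x
termination_by x.toNat
decreasing_by
  rw [PySem.Int.floordiv_eq_ediv_of_pos (by omega)]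
  omega

def cube_alt (n : Int) : Int :=
  (((PySem.List.pyRange 1 (n + 1) 1).map (fun i => i * i * i)).filter
    (fun c => PySem.Int.mod (leadInt c) 2 == 0)).sum

-- ===== PRECONDITION & SPEC =====
def Spec_cube (n : Int) (out : Int) : Prop := out = cube_alt n
instance (n : Int) (out : Int) : Decidable (Spec_cube n out) := by unfold Spec_cube; infer_instance

-- ===== CLAIM (what is proved, stated in full; the proofs are below) =====
def Claim_equal_cube : Prop := ∀ (n : Int), Dom_cube n → Spec_cube n (cube n)

-- ===== LEMMAS AND PROOFS =====

-- leading digit on Nat, mirrors leadInt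
def leadNat (m : Nat) : Nat := if 10 ≤ m then leadNat (m / 10) else m

theorem leadNat_lt_ten (m : Nat) : leadNat m < 10 := by
  induction m using Nat.strong_induction_on with
  | _ m ih =>
    unfold leadNat
    split
    · exact ih (m / 10) (by omega)
    · omega

theorem leadInt_natCast (m : Nat) : leadInt (m : Int) = (leadNat m : Int) := by
  induction m using Nat.strong_induction_on with
  | _ m ih =>
    unfold leadInt leadNat
    by_cases h : 10 ≤ m
    · rw [if_pos (by exact_mod_cast h), if_pos h,
        PySem.Int.floordiv_eq_ediv_of_pos (by omega),
        show ((m : Int)) / 10 = ((m / 10 : Nat) : Int) by push_cast [Int.natCast_div]; rfl]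
      exact ih (m / 10) (by omega)
    · rw [if_neg (by exact_mod_cast h), if_neg h]

theorem leadInt_eq_leadNat (x : Int) (hx : 0 ≤ x) : leadInt x = (leadNat x.toNat : Int) := by
  have h := leadInt_natCast x.toNat
  rwa [Int.toNat_of_nonneg hx] at h

theorem leadNat_step (n : Nat) (h : 10 ≤ n) : leadNat n = leadNat (n / 10) := by
  rw [leadNat, if_pos h]

theorem head?_toDigitsCore (fuel n : Nat) (ds : List Char) (h : n < fuel) :
    (Nat.toDigitsCore 10 fuel n ds).head? = some (Nat.digitChar (leadNat n)) := by
  induction fuel generalizing n ds with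
  | zero => omega
  | succ fuel ih =>
    rw [Nat.toDigitsCore]
    by_cases h : n / 10 = 0
    · rw [if_pos h]
      have hn : n < 10 := by omega
      unfold leadNat
      rw [if_neg (by omega), Nat.mod_eq_of_lt hn]
      rfl
    · have hlt : n / 10 < fuel := by omega
      have h10 : 10 ≤ n := by omega
      rw [if_neg h, ih (n / 10) _ hlt]
      rw [leadNat_step n h10]

theorem ofChars?_digitChar (d : Nat) (hd : d < 10) :
    PySem.Int.ofChars? [Nat.digitChar d] = some (d : Int) := by
  interval_cases d <;> decide

theorem foldl_if_eq_sum_filter {α : Type} (f : α → Int) (Q : Int → Bool) (l : List α) (acc : Int) :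
    l.foldl (fun tot i => if Q (f i) then tot + f i else tot) acc
      = acc + ((l.map f).filter Q).sum := by
  induction l generalizing acc with
  | nil => simp
  | cons x xs ih =>
    simp only [List.foldl_cons, List.map_cons, List.filter_cons]
    by_cases h : Q (f x) = true
    · simp [h, ih]; ring
    · rw [if_neg h, ih]
      simp [h]

theorem pyGet?_zero_head? {α : Type} (xs : List α) : PySem.List.pyGet? xs 0 = xs.head? := by
  cases xs <;> simp [PySem.List.pyGet?, PySem.List.pyIdx?]

theorem body_eq (i : Int) (hi : 1 ≤ i) :
    (let result := i * i * i
     let resultAsString := PySem.Int.toStr result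
     let firstChar := (PySem.Str.pyGet? resultAsString 0).getD '0'
     let firstCharAsInt := (PySem.Int.ofChars? [firstChar]).getD 0
     firstCharAsInt) = leadInt (i * i * i) := by
  have hres : (1 : Int) ≤ i * i * i := by nlinarith
  simp only [PySem.Int.toStr, PySem.Int.toChars, if_neg (show ¬ i * i * i < 0 by omega),
    PySem.Str.pyGet?, String.toList_ofList, PySem.Chars.pyGet?_eq_listPyGet?, Nat.toDigits,
    pyGet?_zero_head?]
  rw [head?_toDigitsCore ((i * i * i).toNat + 1) (i * i * i).toNat [] (Nat.lt_succ_self _),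
    Option.getD_some, ofChars?_digitChar _ (leadNat_lt_ten _), Option.getD_some,
    leadInt_eq_leadNat _ (by omega)]

-- ===== VERDICT (by name: the statement is the Claim_ definition above) =====
theorem cube_spec : Claim_equal_cube := by
  intro n _
  unfold Spec_cube cube cube_alt
  rw [PySem.List.foldl_congr_mem (PySem.List.pyRange 1 (n + 1) 1) _
        (fun tot i => if PySem.Int.mod (leadInt (i * i * i)) 2 == 0 then tot + i * i * i else tot) 0
        (by
          intro acc x hx
          have hx1 : 1 ≤ x := (PySem.List.mem_pyRange_one.mp hx).1
          simp only [body_eq x hx1]),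
      foldl_if_eq_sum_filter (fun i => i * i * i)
        (fun c => PySem.Int.mod (leadInt c) 2 == 0) _ 0, zero_add]
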